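-- pv_equiv track=rewrite | github.com/angelovang/Soft_Uni_problems_solutions | Fundamental_05_2022/Fundamental_exerc/Dictionaries_more_exerc/judge.py | get_contests_dict
-- ===== SOURCE A (Python) =====
-- def get_contests_dict(participants_dict):
--     result ={}
--     for key,value in participants_dict.items():
--         for key_nested,value_nested in value.items():
--             if key_nested not in result:
--                 result[key_nested]= {}
--             result[key_nested].update({key:value_nested})
--     return result
-- ===== SOURCE B (Python) =====
-- def get_contests_dict(participants_dict):
--     # Pass 1: collect contest keys in first-seen order.
--     contests = []
--     for value in participants_dict.values():
--         for contest in value: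
--             if contest not in contests:
--                 contests.append(contest)
--     # Pass 2: build each contest's inner dict by scanning participants.
--     return {contest: {participant: value[contest]
--                       for participant, value in participants_dict.items()
--                       if contest in value}
--             for contest in contests}
-- ===== Notes on version B (the rewrite author's own statement) =====
-- stated objective: alternative
-- what changed: Inverts the loop nesting: B first collects all contest keys in first-seen order in one pass, then builds each contest's inner dict by a comprehension over the participants, instead of A's single fused pass that updates nested dicts in place.
import Mathlib
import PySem

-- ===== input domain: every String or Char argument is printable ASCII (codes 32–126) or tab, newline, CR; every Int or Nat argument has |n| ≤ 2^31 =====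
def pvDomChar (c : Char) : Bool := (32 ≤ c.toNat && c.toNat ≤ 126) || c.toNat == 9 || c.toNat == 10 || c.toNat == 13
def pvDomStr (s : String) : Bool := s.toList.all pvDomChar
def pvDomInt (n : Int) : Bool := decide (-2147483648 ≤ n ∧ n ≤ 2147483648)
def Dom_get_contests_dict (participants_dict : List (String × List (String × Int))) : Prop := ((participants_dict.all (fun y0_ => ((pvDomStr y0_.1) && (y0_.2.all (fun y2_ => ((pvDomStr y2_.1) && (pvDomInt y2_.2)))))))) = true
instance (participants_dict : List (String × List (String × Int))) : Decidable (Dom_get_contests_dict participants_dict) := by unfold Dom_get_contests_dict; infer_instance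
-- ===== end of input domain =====

-- B inverts A's loop nesting: it first collects the contest keys in first-seen order,
-- then builds each contest's inner dict by one comprehension over the participants (objective: alternative).

-- ===== PORT A =====
def get_contests_dict (participants_dict : List (String × List (String × Int))) : List (String × List (String × Int)) :=
  let result : PySem.Dict String (PySem.Dict String Int) :=
    participants_dict.foldl (fun result kv =>
      kv.2.foldl (fun result q =>
        let result := if !(result.contains q.1) then result.insert q.1 PySem.Dict.empty else result
        result.modify q.1 PySem.Dict.empty (fun d => d.insert kv.1 q.2)) result)
      PySem.Dict.empty
  result.items.map (fun p => (p.1, p.2.items))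

-- ===== PORT B =====
def get_contests_dict_alt (participants_dict : List (String × List (String × Int))) : List (String × List (String × Int)) :=
  let contests : List String :=
    participants_dict.foldl (fun acc kv =>
      kv.2.foldl (fun acc q => if acc.contains q.1 then acc else acc ++ [q.1]) acc) []
  contests.map (fun c => (c,
    participants_dict.filterMap (fun kv =>
      ((PySem.Dict.mk kv.2).get? c).map (fun w => (kv.1, w)))))

-- ===== PRECONDITION & SPEC =====
-- Pre_ excludes association lists with duplicate top-level or duplicate inner keys:
-- such lists do not represent any Python dict (every Python dict input has unique keys).
def Pre_get_contests_dict (participants_dict : List (String × List (String × Int))) : Prop :=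
  (participants_dict.map Prod.fst).Nodup ∧ ∀ kv ∈ participants_dict, (kv.2.map Prod.fst).Nodup
instance (participants_dict : List (String × List (String × Int))) : Decidable (Pre_get_contests_dict participants_dict) := by unfold Pre_get_contests_dict; infer_instance

def pvWitness_get_contests_dict : (List (String × List (String × Int))) :=
  [("Anna", [("math", 10)]), ("Bob", [("math", 5), ("art", 7)])]

def Spec_get_contests_dict (participants_dict : List (String × List (String × Int))) (out : List (String × List (String × Int))) : Prop := out = get_contests_dict_alt participants_dict
instance (participants_dict : List (String × List (String × Int))) (out : List (String × List (String × Int))) : Decidable (Spec_get_contests_dict participants_dict out) := by unfold Spec_get_contests_dict; infer_instance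

-- ===== CLAIM (what is proved, stated in full; the proofs are below) =====
def Claim_equal_get_contests_dict : Prop := ∀ (participants_dict : List (String × List (String × Int))), Dom_get_contests_dict participants_dict → Pre_get_contests_dict participants_dict → Spec_get_contests_dict participants_dict (get_contests_dict participants_dict)

-- ===== LEMMAS AND PROOFS =====

-- A's inner loop body, as in the port of A.
def pvAstep (k : String) (result : PySem.Dict String (PySem.Dict String Int)) (q : String × Int) : PySem.Dict String (PySem.Dict String Int) :=
  let result := if !(result.contains q.1) then result.insert q.1 PySem.Dict.empty else result
  result.modify q.1 PySem.Dict.empty (fun d => d.insert k q.2)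

-- B's contest-collection inner loop, as in the port of B.
def pvCon1 (acc : List String) (v : List (String × Int)) : List String :=
  v.foldl (fun acc q => if acc.contains q.1 then acc else acc ++ [q.1]) acc

def pvCons (pd : List (String × List (String × Int))) : List String :=
  pd.foldl (fun acc kv => pvCon1 acc kv.2) []

-- B's inner dict for contest c.
def pvEnt (pd : List (String × List (String × Int))) (c : String) : List (String × Int) :=
  pd.filterMap (fun kv => ((PySem.Dict.mk kv.2).get? c).map (fun w => (kv.1, w)))

-- the effect of one participant (k, v) on the inner dict of contest c
def pvF (v : List (String × Int)) (k : String) (f : String → PySem.Dict String Int) (c : String) : PySem.Dict String Int :=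
  match (PySem.Dict.mk v).get? c with
  | some w => (f c).insert k w
  | none => f c

theorem pvCon1_cons (acc : List String) (q : String × Int) (t : List (String × Int)) :
    pvCon1 acc (q :: t) = pvCon1 (if q.1 ∈ acc then acc else acc ++ [q.1]) t := by
  simp only [pvCon1, List.foldl_cons, List.contains_iff_mem]

theorem mem_pvCon1 {acc : List String} {v : List (String × Int)} {c : String} :
    c ∈ pvCon1 acc v ↔ c ∈ acc ∨ c ∈ v.map Prod.fst := by
  induction v generalizing acc with
  | nil => simp [pvCon1]
  | cons q t ih =>
    rw [pvCon1_cons, ih]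
    by_cases h : q.1 ∈ acc
    · simp only [h, if_true, List.map_cons, List.mem_cons]
      constructor
      · tauto
      · rintro (hc | rfl | hc) <;> tauto
    · simp only [h, if_false, List.mem_append, List.map_cons, List.mem_cons]
      tauto

theorem nodup_pvCon1 {acc : List String} (v : List (String × Int)) (h : acc.Nodup) :
    (pvCon1 acc v).Nodup := by
  induction v generalizing acc with
  | nil => simpa [pvCon1] using h
  | cons q t ih =>
    rw [pvCon1_cons]
    by_cases hq : q.1 ∈ acc
    · simpa [hq] using ih h
    · simp only [hq, if_false]
      exact ih (List.nodup_append.mpr ⟨h, List.nodup_singleton _, by intro a ha b hb; simp only [List.mem_singleton] at hb; subst hb; exact fun h => hq (h ▸ ha)⟩)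

theorem mem_pvConsAux {pd : List (String × List (String × Int))} {acc : List String} {c : String} :
    c ∈ pd.foldl (fun acc kv => pvCon1 acc kv.2) acc ↔ c ∈ acc ∨ ∃ kv ∈ pd, c ∈ kv.2.map Prod.fst := by
  induction pd generalizing acc with
  | nil => simp
  | cons kv t ih => simp [ih, mem_pvCon1, or_assoc]

theorem nodup_pvCons (pd : List (String × List (String × Int))) : (pvCons pd).Nodup := by
  have : ∀ (pd : List (String × List (String × Int))) (acc : List String), acc.Nodup →
      (pd.foldl (fun acc kv => pvCon1 acc kv.2) acc).Nodup := by
    intro pd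
    induction pd with
    | nil => intro acc h; exact h
    | cons kv t ih => intro acc h; exact ih _ (nodup_pvCon1 _ h)
  exact this pd [] List.nodup_nil

theorem pvEnt_keys_sub {pd : List (String × List (String × Int))} {c k : String}
    (h : k ∈ (pvEnt pd c).map Prod.fst) : k ∈ pd.map Prod.fst := by
  simp only [pvEnt, List.map_filterMap, List.mem_filterMap] at h
  obtain ⟨kv, hkv, hk⟩ := h
  cases hg : (PySem.Dict.mk kv.2).get? c with
  | none => simp [hg] at hk
  | some w =>
    simp [hg] at hk
    subst hk
    exact List.mem_map_of_mem hkv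

theorem pvEnt_nil {pd : List (String × List (String × Int))} {c : String}
    (h : ∀ kv ∈ pd, c ∉ kv.2.map Prod.fst) : pvEnt pd c = [] := by
  simp only [pvEnt, List.filterMap_eq_nil_iff]
  intro kv hkv
  have : (PySem.Dict.mk kv.2).get? c = none := by
    rw [PySem.Dict.get?_eq_none_iff_not_mem_keys]
    simpa [PySem.Dict.keys] using h kv hkv
  simp [this]

theorem pvEnt_append (xs : List (String × List (String × Int))) (k : String)
    (v : List (String × Int)) (c : String) :
    pvEnt (xs ++ [(k, v)]) c =
      pvEnt xs c ++ (((PySem.Dict.mk v).get? c).map (fun w => (k, w))).toList := by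
  cases hg : (PySem.Dict.mk v).get? c <;> simp [pvEnt, List.filterMap_append, hg]

-- get?/contains on a dict of the map form
theorem contains_mapform (M : List String) (f : String → PySem.Dict String Int) (c : String) :
    (PySem.Dict.mk (M.map (fun c' => (c', f c')))).contains c = decide (c ∈ M) := by
  simp [PySem.Dict.contains, List.any_eq, List.mem_map]

theorem getD_mapform {M : List String} {f : String → PySem.Dict String Int} {c : String}
    (hc : c ∈ M) :
    (PySem.Dict.mk (M.map (fun c' => (c', f c')))).getD c PySem.Dict.empty = f c := by
  induction M with
  | nil => simp at hc
  | cons a t ih =>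
    by_cases h : c = a
    · subst h; simp [PySem.Dict.getD, PySem.Dict.get?]
    · have hct : c ∈ t := by rcases List.mem_cons.mp hc with h' | h' ; exact absurd h' h ; exact h'
      have : (a == c) = false := by simpa using fun h' => h h'.symm
      simpa [PySem.Dict.getD, PySem.Dict.get?, List.find?, this] using ih hct

theorem insert_mapform {M : List String} {f : String → PySem.Dict String Int} {c : String}
    (hc : c ∈ M) (nv : PySem.Dict String Int) :
    (PySem.Dict.mk (M.map (fun c' => (c', f c')))).insert c nv =
      PySem.Dict.mk (M.map (fun c' => (c', if c' = c then nv else f c'))) := by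
  rw [PySem.Dict.insert]
  rw [contains_mapform]
  simp only [hc, decide_true, if_true, List.map_map]
  congr 1
  apply List.map_congr_left
  intro c' _
  by_cases h : c' = c
  · subst h; simp
  · have : (c' == c) = false := by simpa using h
    simp [h]

theorem modify_mapform {M : List String} {f : String → PySem.Dict String Int} {c : String}
    (hc : c ∈ M) (g : PySem.Dict String Int → PySem.Dict String Int) :
    (PySem.Dict.mk (M.map (fun c' => (c', f c')))).modify c PySem.Dict.empty g =
      PySem.Dict.mk (M.map (fun c' => (c', if c' = c then g (f c) else f c'))) := by
  rw [PySem.Dict.modify, getD_mapform hc, insert_mapform hc]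

theorem pvF_cons {t : List (String × Int)} (c : String) (w : Int) (k : String)
    {f : String → PySem.Dict String Int} (hct : c ∉ t.map Prod.fst) (c' : String) :
    pvF ((c, w) :: t) k f c' =
      pvF t k (fun c'' => if c'' = c then (f c).insert k w else f c'') c' := by
  by_cases h : c' = c
  · subst h
    have hn : (PySem.Dict.mk t).get? c' = none := by
      rw [PySem.Dict.get?_eq_none_iff_not_mem_keys]
      simpa [PySem.Dict.keys] using hct
    simp [pvF, PySem.Dict.get?_mk_cons, hn]
  · have : (c == c') = false := by simpa using fun h' => h h'.symm
    simp only [pvF, PySem.Dict.get?_mk_cons, this, Bool.false_eq_true, if_false, if_neg h]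

-- core: one participant's inner loop, on a map-form state
theorem pvInner (k : String) (v : List (String × Int)) :
    ∀ (M : List String) (f : String → PySem.Dict String Int),
      M.Nodup → (v.map Prod.fst).Nodup →
      (∀ c, c ∉ M → f c = PySem.Dict.empty) →
      v.foldl (pvAstep k) (PySem.Dict.mk (M.map (fun c => (c, f c)))) =
        PySem.Dict.mk ((pvCon1 M v).map (fun c => (c, pvF v k f c))) := by
  induction v with
  | nil =>
    intro M f _ _ _
    have : ∀ c, pvF [] k f c = f c := by intro c; simp [pvF, PySem.Dict.get?]
    simp [pvCon1, this]
  | cons q t ih =>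
    obtain ⟨c, w⟩ := q
    intro M f hM hv hf
    have hv' := List.nodup_cons.mp (show (c :: t.map Prod.fst).Nodup by simpa using hv)
    have hct : c ∉ t.map Prod.fst := hv'.1
    have htnd : (t.map Prod.fst).Nodup := hv'.2
    -- the state after the guard + modify
    have hstate : pvAstep k (PySem.Dict.mk (M.map (fun c' => (c', f c')))) (c, w) =
        PySem.Dict.mk ((if c ∈ M then M else M ++ [c]).map
          (fun c' => (c', if c' = c then (f c).insert k w else f c'))) := by
      by_cases hc : c ∈ M
      · rw [pvAstep]
        simp only [contains_mapform, hc, decide_true, Bool.not_true, Bool.false_eq_true, if_false]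
        rw [modify_mapform hc]
        simp [hc]
      · rw [pvAstep]
        simp only [contains_mapform, hc, decide_false, Bool.not_false, if_true]
        have hemp : f c = PySem.Dict.empty := hf c hc
        have hins : (PySem.Dict.mk (M.map (fun c' => (c', f c')))).insert c PySem.Dict.empty =
            PySem.Dict.mk ((M ++ [c]).map (fun c' => (c', f c'))) := by
          rw [PySem.Dict.insert, contains_mapform]
          simp [hc, hemp]
        rw [hins, modify_mapform (by simp : c ∈ M ++ [c])]
        simp [hemp]
    rw [List.foldl_cons, hstate,
        ih (if c ∈ M then M else M ++ [c]) _
          (by by_cases hc : c ∈ M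
              · simpa [hc] using hM
              · simp only [hc, if_false]
                exact List.nodup_append.mpr ⟨hM, List.nodup_singleton _,
                  by intro a ha b hb; simp only [List.mem_singleton] at hb; subst hb; exact fun h => hc (h ▸ ha)⟩)
          htnd
          (by intro c' hc'
              by_cases hc : c ∈ M <;> simp [hc] at hc' <;>
                [skip; skip] <;> first
                | (have h1 : c' ≠ c := by rintro rfl; exact hc' hc
                   simp [h1, hf c' hc'])
                | (have h1 : c' ≠ c := fun h => hc'.2 h
                   simp [h1, hf c' (by tauto)]))]
    rw [pvCon1_cons]
    congr 1
    apply List.map_congr_left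
    intro c' _
    rw [pvF_cons c w k hct c']

def pvAfold (result : PySem.Dict String (PySem.Dict String Int))
    (kv : String × List (String × Int)) : PySem.Dict String (PySem.Dict String Int) :=
  kv.2.foldl (pvAstep kv.1) result

theorem pvMain (pd : List (String × List (String × Int))) (hpre : Pre_get_contests_dict pd) :
    pd.foldl pvAfold PySem.Dict.empty =
      PySem.Dict.mk ((pvCons pd).map (fun c => (c, PySem.Dict.mk (pvEnt pd c)))) := by
  induction pd using List.reverseRecOn with
  | nil => simp [pvCons, PySem.Dict.empty, pvEnt]
  | append_singleton xs a ih =>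
    obtain ⟨k, v⟩ := a
    obtain ⟨hnd, hinn⟩ := hpre
    have hxs : Pre_get_contests_dict xs := by
      constructor
      · exact (List.nodup_append.mp (by simpa using hnd)).1
      · intro kv hkv; exact hinn kv (List.mem_append_left _ hkv)
    have hk : k ∉ xs.map Prod.fst := by
      have := List.nodup_append.mp (by simpa using hnd)
      intro hmem
      exact this.2.2 k hmem k (by simp) rfl
    have hv : (v.map Prod.fst).Nodup := hinn (k, v) (by simp)
    rw [List.foldl_append, ih hxs, List.foldl_cons, List.foldl_nil]
    show v.foldl (pvAstep k) _ = _
    rw [pvInner k v (pvCons xs) _ (nodup_pvCons xs) hv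
        (by intro c hc
            have : pvEnt xs c = [] := by
              apply pvEnt_nil
              intro kv hkv hmem
              exact hc (mem_pvConsAux.mpr (Or.inr ⟨kv, hkv, hmem⟩))
            simp [this, PySem.Dict.empty])]
    have hcons : pvCons (xs ++ [(k, v)]) = pvCon1 (pvCons xs) v := by
      simp [pvCons, List.foldl_append]
    rw [hcons]
    congr 1
    apply List.map_congr_left
    intro c _
    have : pvF v k (fun c => PySem.Dict.mk (pvEnt xs c)) c = PySem.Dict.mk (pvEnt (xs ++ [(k, v)]) c) := by
      rw [pvEnt_append]
      cases hg : (PySem.Dict.mk v).get? c with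
      | none => simp [pvF, hg]
      | some w =>
        simp only [pvF, hg, Option.map_some, Option.toList_some]
        have hnc : (PySem.Dict.mk (pvEnt xs c)).contains k = false := by
          rw [PySem.Dict.contains_eq_decide_mem_keys]
          simp only [decide_eq_false_iff_not, PySem.Dict.keys]
          intro hmem
          exact hk (pvEnt_keys_sub hmem)
        rw [PySem.Dict.insert, hnc]
        simp
    rw [this]

-- ===== VERDICT (by name: the statement is the Claim_ definition above) =====
theorem get_contests_dict_spec : Claim_equal_get_contests_dict := by
  intro pd _ hpre
  show get_contests_dict pd = get_contests_dict_alt pd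
  have hA : get_contests_dict pd =
      (pd.foldl pvAfold PySem.Dict.empty).items.map (fun p => (p.1, p.2.items)) := rfl
  have hB : get_contests_dict_alt pd = (pvCons pd).map (fun c => (c, pvEnt pd c)) := rfl
  rw [hA, hB, pvMain pd hpre]
  simp [List.map_map]
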